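-- pv_equiv track=rewrite | github.com/AMinSC/TIL | 프로그래머스/unrated/181930. 주사위 게임 2/주사위 게임 2.py | solution
-- ===== SOURCE A (Python) =====
-- def solution(a, b, c):
--     answer = 1
--     if a == b == c:
--         for i in range(1, 4):
--             answer *= a ** i + b ** i + c ** i
--     elif a == b or a == c or b == c:
--         for i in range(1, 3):
--             answer *= a ** i + b ** i + c ** i
--     else:
--         answer *= a + b + c
--     return answer
-- ===== SOURCE B (Python) =====
-- def solution(a, b, c):
--     # Branchless closed form: precompute the three power sums once and
--     # select factors by boolean exponents (no loop, no if/elif chain).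
--     s1 = a + b + c
--     s2 = a * a + b * b + c * c
--     s3 = a ** 3 + b ** 3 + c ** 3
--     e = (a == b) + (a == c) + (b == c)  # 0 (all distinct), 1 (one pair), 3 (all equal)
--     return s1 * s2 ** (e >= 1) * s3 ** (e == 3)
-- ===== Notes on version B (the rewrite author's own statement) =====
-- stated objective: simpler
-- what changed: B removes both the loop and the if/elif branch chain: it precomputes the three power sums once and returns a single branchless product s1 * s2**(e>=1) * s3**(e==3), where e counts the equal pairs.
import Mathlib
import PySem

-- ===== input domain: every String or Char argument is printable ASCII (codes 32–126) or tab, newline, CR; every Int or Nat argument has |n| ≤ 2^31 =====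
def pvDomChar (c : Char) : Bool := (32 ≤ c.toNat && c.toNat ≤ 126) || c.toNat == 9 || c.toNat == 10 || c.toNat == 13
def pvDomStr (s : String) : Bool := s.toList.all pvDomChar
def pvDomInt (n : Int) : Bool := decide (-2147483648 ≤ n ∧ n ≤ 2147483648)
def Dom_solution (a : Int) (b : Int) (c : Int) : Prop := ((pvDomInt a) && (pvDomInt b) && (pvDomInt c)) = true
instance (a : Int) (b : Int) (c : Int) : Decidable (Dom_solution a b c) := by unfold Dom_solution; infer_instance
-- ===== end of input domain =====

-- B is branchless and loop-free: the three power sums are computed once and the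
-- answer is a single product with boolean exponents, instead of A's if/elif chain of loops.

-- ===== PORT A =====
def solution (a : Int) (b : Int) (c : Int) : Int :=
  if a = b ∧ b = c then
    (PySem.List.pyRange 1 4 1).foldl (fun ans i => ans * (a ^ i.toNat + b ^ i.toNat + c ^ i.toNat)) 1
  else if a = b ∨ a = c ∨ b = c then
    (PySem.List.pyRange 1 3 1).foldl (fun ans i => ans * (a ^ i.toNat + b ^ i.toNat + c ^ i.toNat)) 1
  else
    1 * (a + b + c)

-- ===== PORT B =====
def solution_alt (a : Int) (b : Int) (c : Int) : Int :=
  let s1 := a + b + c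
  let s2 := a * a + b * b + c * c
  let s3 := a ^ 3 + b ^ 3 + c ^ 3
  let e : Int := (if a = b then 1 else 0) + (if a = c then 1 else 0) + (if b = c then 1 else 0)
  s1 * s2 ^ (if e ≥ 1 then (1 : Nat) else 0) * s3 ^ (if e = 3 then (1 : Nat) else 0)

-- ===== PRECONDITION & SPEC =====
def Spec_solution (a : Int) (b : Int) (c : Int) (out : Int) : Prop := out = solution_alt a b c
instance (a : Int) (b : Int) (c : Int) (out : Int) : Decidable (Spec_solution a b c out) := by unfold Spec_solution; infer_instance

-- ===== CLAIM =====
def Claim_equal_solution : Prop := ∀ (a : Int) (b : Int) (c : Int), Dom_solution a b c → Spec_solution a b c (solution a b c)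

-- ===== LEMMAS AND PROOFS =====

-- ===== VERDICT =====
theorem solution_spec : Claim_equal_solution := by
  intro a b c _
  have h4 : PySem.List.pyRange 1 4 1 = [1, 2, 3] := by decide
  have h3 : PySem.List.pyRange 1 3 1 = [1, 2] := by decide
  unfold Spec_solution solution solution_alt
  rw [h4, h3]
  by_cases hab : a = b <;> by_cases hbc : b = c <;> by_cases hac : a = c <;>
    simp_all [List.foldl] <;>
      first
      | exact Or.inl (Or.inl (by ring))
      | exact Or.inl (by ring)
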